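-- pv_equiv track=rewrite | github.com/krishnasreeja/CRCBAC_code | conflict_resolve_code_dataset_result/conflict_servercode.py | process_matched_results
-- ===== SOURCE A (Python) =====
-- def process_matched_results(matched_results):
--     final_result = []
--     allow_found = False
--
--     for role, context, capability, permission in matched_results:
--         if not allow_found:
--             if permission == "allow":
--                 final_result.append((role, context, capability, permission))
--                 allow_found = True
--             else:
--                 final_result.append((role, context, capability, "deny"))
--         else:
--             final_result.append((role, context, capability, "deny"))
--
--     return final_result
-- ===== SOURCE B (Python) =====
-- def process_matched_results(matched_results):
--     idx = next((i for i, row in enumerate(matched_results) if row[3] == "allow"), None)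
--     return [row if i == idx else (row[0], row[1], row[2], "deny")
--             for i, row in enumerate(matched_results)]
-- ===== Notes on version B (the rewrite author's own statement) =====
-- stated objective: alternative
-- what changed: B first locates the index of the first 'allow' row with next() over enumerate, then rebuilds the list in one comprehension keeping only that index unchanged, instead of A's loop threading an allow_found boolean flag through nested branches.
import Mathlib
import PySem

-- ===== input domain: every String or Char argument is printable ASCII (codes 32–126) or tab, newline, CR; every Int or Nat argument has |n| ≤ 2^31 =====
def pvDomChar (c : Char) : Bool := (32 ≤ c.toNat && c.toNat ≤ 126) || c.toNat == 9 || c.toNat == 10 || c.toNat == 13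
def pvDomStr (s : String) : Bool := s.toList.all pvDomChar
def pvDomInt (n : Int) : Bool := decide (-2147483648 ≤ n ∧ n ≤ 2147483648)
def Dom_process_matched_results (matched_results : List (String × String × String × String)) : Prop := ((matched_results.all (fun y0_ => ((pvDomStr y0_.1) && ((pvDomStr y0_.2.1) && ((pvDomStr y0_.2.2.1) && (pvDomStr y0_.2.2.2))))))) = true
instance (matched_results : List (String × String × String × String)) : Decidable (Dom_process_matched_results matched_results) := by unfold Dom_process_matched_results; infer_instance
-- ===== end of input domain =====

-- B locates the first 'allow' index, then rebuilds the list in one pass keeping only that row; same O(n) cost, different decomposition than A's boolean-flag loop.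


-- ===== PORT A =====
-- the Python loop, threading the allow_found flag; appending to final_result becomes cons-recursion
def pvLoopA (rows : List (String × String × String × String)) (allow_found : Bool) :
    List (String × String × String × String) :=
  match rows with
  | [] => []
  | (role, context, capability, permission) :: rest =>
    if ¬ allow_found then
      if permission == "allow" then
        (role, context, capability, permission) :: pvLoopA rest true
      else
        (role, context, capability, "deny") :: pvLoopA rest allow_found
    else
      (role, context, capability, "deny") :: pvLoopA rest allow_found

def process_matched_results (matched_results : List (String × String × String × String)) : List (String × String × String × String) :=
  pvLoopA matched_results false

-- ===== PORT B =====
def process_matched_results_alt (matched_results : List (String × String × String × String)) : List (String × String × String × String) :=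
  let idx : Option Int :=
    ((PySem.List.enumerate matched_results).find? (fun p => p.2.2.2.2 == "allow")).map (·.1)
  (PySem.List.enumerate matched_results).map
    (fun p => if idx = some p.1 then p.2 else (p.2.1, p.2.2.1, p.2.2.2.1, "deny"))

-- ===== PRECONDITION & SPEC =====
def Spec_process_matched_results (matched_results : List (String × String × String × String)) (out : List (String × String × String × String)) : Prop := out = process_matched_results_alt matched_results
instance (matched_results : List (String × String × String × String)) (out : List (String × String × String × String)) : Decidable (Spec_process_matched_results matched_results out) := by unfold Spec_process_matched_results; infer_instance

-- ===== CLAIM (what is proved, stated in full; the proofs are below) =====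
def Claim_equal_process_matched_results : Prop := ∀ (matched_results : List (String × String × String × String)), Dom_process_matched_results matched_results → Spec_process_matched_results matched_results (process_matched_results matched_results)

-- ===== LEMMAS AND PROOFS =====

-- the per-row function of B's comprehension, for a given pivot index
def pvB (idx : Option Int) (p : Int × (String × String × String × String)) :
    String × String × String × String :=
  if idx = some p.1 then p.2 else (p.2.1, p.2.2.1, p.2.2.2.1, "deny")

-- an index found in enumerate rows s is ≥ s
theorem pv_find_ge (rows : List (String × String × String × String)) (s : Int)
    (q : Int × (String × String × String × String))
    (h : (PySem.List.enumerate rows s).find? (fun p => p.2.2.2.2 == "allow") = some q) :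
    s ≤ q.1 := by
  have hm := List.mem_of_find?_eq_some h
  rw [PySem.List.mem_enumerate_iff] at hm
  obtain ⟨k, hk, rfl⟩ := hm
  simp

-- once the pivot index is below every enumerated index, B denies every row
theorem pv_map_deny (rows : List (String × String × String × String)) (s : Int)
    (idx : Option Int) (h : ∀ k, idx = some k → k < s) :
    (PySem.List.enumerate rows s).map (pvB idx)
      = rows.map (fun r => (r.1, r.2.1, r.2.2.1, "deny")) := by
  induction rows generalizing s with
  | nil => simp [PySem.List.enumerate_nil]
  | cons r rest ih =>
    rw [PySem.List.enumerate_cons]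
    have hne : idx ≠ some s := by
      intro hs; have := h s hs; omega
    simp only [List.map_cons, pvB, if_neg hne]
    rw [ih (s + 1) (fun k hk => by have := h k hk; omega)]

-- once the flag is set, A denies every remaining row
theorem pv_loopA_true (rows : List (String × String × String × String)) :
    pvLoopA rows true = rows.map (fun r => (r.1, r.2.1, r.2.2.1, "deny")) := by
  induction rows with
  | nil => simp [pvLoopA]
  | cons x xs ihx =>
    obtain ⟨a, b, c, d⟩ := x
    simp [pvLoopA, ihx]

-- main invariant: the A-loop with flag still false equals B's rebuild from offset s
theorem pv_main (rows : List (String × String × String × String)) (s : Int) :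
    pvLoopA rows false
      = (PySem.List.enumerate rows s).map
          (pvB (((PySem.List.enumerate rows s).find? (fun p => p.2.2.2.2 == "allow")).map (·.1))) := by
  induction rows generalizing s with
  | nil => simp [pvLoopA, PySem.List.enumerate_nil]
  | cons r rest ih =>
    obtain ⟨role, context, capability, permission⟩ := r
    rw [PySem.List.enumerate_cons]
    by_cases hp : permission == "allow"
    · have hfind : ((s, (role, context, capability, permission)) ::
          PySem.List.enumerate rest (s + 1)).find? (fun p => p.2.2.2.2 == "allow")
          = some (s, (role, context, capability, permission)) := by
        simp [hp]
      rw [hfind]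
      have hB := pv_map_deny rest (s + 1) (some s)
        (by intro k hk; injection hk with h; omega)
      simp [pvLoopA, hp, pvB, pv_loopA_true, hB]
    · have hfind : ((s, (role, context, capability, permission)) ::
          PySem.List.enumerate rest (s + 1)).find? (fun p => p.2.2.2.2 == "allow")
          = (PySem.List.enumerate rest (s + 1)).find? (fun p => p.2.2.2.2 == "allow") := by
        simp [hp]
      rw [hfind]
      -- head is denied: any found index is ≥ s+1 > s
      have hhead : pvB
          (((PySem.List.enumerate rest (s + 1)).find? (fun p => p.2.2.2.2 == "allow")).map (·.1))
          (s, (role, context, capability, permission))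
          = (role, context, capability, "deny") := by
        unfold pvB
        rw [if_neg]
        intro hidx
        rcases Option.map_eq_some_iff.mp hidx with ⟨q, hq, hq1⟩
        have := pv_find_ge rest (s + 1) q hq
        omega
      simp [pvLoopA, hp, hhead, ih (s + 1)]

-- ===== VERDICT (by name: the statement is the Claim_ definition above) =====
theorem process_matched_results_spec : Claim_equal_process_matched_results := by
  intro ms _
  show process_matched_results ms = process_matched_results_alt ms
  unfold process_matched_results process_matched_results_alt
  simpa [pvB] using pv_main ms 0
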